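-- pv_equiv track=rewrite | github.com/MrBrantCode/unitest_baseline | mut_generate/mist_train_cf/cf_9814/solution.py | sum_and_count_distinct
-- ===== SOURCE A (Python) =====
-- def sum_and_count_distinct(arr):
--     # Create a dictionary to store the count of each distinct element
--     count_dict = {}
--
--     # Initialize the sum and count of distinct elements to zero
--     sum = 0
--     count = 0
--
--     # Iterate over the array
--     for num in arr:
--         # Add the current number to the sum
--         sum += num
--
--         # Check if the current number is already in the dictionary
--         if num in count_dict:
--             # If it is, increment its count by 1
--             count_dict[num] += 1
--         else:
--             # If it is not, add it to the dictionary with a count of 1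
--             count_dict[num] = 1
--             # Increment the count of distinct elements by 1
--             count += 1
--
--     # Return the sum and count of distinct elements
--     return sum, count
-- ===== SOURCE B (Python) =====
-- def sum_and_count_distinct(arr):
--     # Different algorithm: sort, then count boundaries between adjacent unequal
--     # elements; no hash container (dict/set) is used at all.
--     lst = sorted(arr)
--     if not lst:
--         return 0, 0
--     distinct = 1 + sum(1 for x, y in zip(lst, lst[1:]) if x != y)
--     return sum(lst), distinct
-- ===== Notes on version B (the rewrite author's own statement) =====
-- stated objective: alternative
-- what changed: Replaces A's single hash-based pass (count dict + running sum + distinct counter) with a comparison-based algorithm: sort the list, then the distinct count is 1 plus the number of adjacent unequal pairs in the sorted order; no dict or set is used.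
import Mathlib
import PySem

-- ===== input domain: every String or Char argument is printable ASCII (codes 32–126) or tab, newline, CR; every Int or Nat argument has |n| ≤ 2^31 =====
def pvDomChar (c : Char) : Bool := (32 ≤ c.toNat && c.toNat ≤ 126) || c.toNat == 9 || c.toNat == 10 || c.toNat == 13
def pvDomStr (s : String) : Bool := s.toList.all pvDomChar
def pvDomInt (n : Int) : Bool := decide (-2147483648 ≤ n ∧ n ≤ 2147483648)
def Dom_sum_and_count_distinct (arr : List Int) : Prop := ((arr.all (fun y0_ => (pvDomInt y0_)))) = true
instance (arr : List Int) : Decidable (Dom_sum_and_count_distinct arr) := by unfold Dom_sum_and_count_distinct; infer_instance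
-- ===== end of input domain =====

-- B replaces A's hash-based single pass (count dict + running sum + distinct counter) with a
-- comparison-based algorithm: sort, then count adjacent unequal pairs; objective: alternative.


-- ===== PORT A =====
-- one pass; state = (count_dict, sum, count)
def sum_and_count_distinct (arr : List Int) : Int × Int :=
  let st := arr.foldl
    (fun (st : PySem.Dict Int Int × Int × Int) num =>
      let s := st.2.1 + num
      if st.1.contains num then
        (st.1.modify num 0 (· + 1), s, st.2.2)
      else
        (st.1.insert num 1, s, st.2.2 + 1))
    (PySem.Dict.empty, 0, 0)
  (st.2.1, st.2.2)

-- ===== PORT B =====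
-- lst = sorted(arr); if not lst: return 0, 0;
-- distinct = 1 + sum(1 for x, y in zip(lst, lst[1:]) if x != y); return sum(lst), distinct
def sum_and_count_distinct_alt (arr : List Int) : Int × Int :=
  let lst := PySem.List.sorted arr (fun x => x) false
  if lst = [] then (0, 0)
  else
    let distinct : Int := 1 +
      ((lst.zip (PySem.List.slice lst (some 1) none)).foldl
        (fun acc p => if p.1 ≠ p.2 then acc + 1 else acc) 0)
    (lst.sum, distinct)

-- ===== PRECONDITION & SPEC =====
def Spec_sum_and_count_distinct (arr : List Int) (out : Int × Int) : Prop := out = sum_and_count_distinct_alt arr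
instance (arr : List Int) (out : Int × Int) : Decidable (Spec_sum_and_count_distinct arr out) := by unfold Spec_sum_and_count_distinct; infer_instance

-- ===== CLAIM =====
def Claim_equal_sum_and_count_distinct : Prop := ∀ (arr : List Int), Dom_sum_and_count_distinct arr → Spec_sum_and_count_distinct arr (sum_and_count_distinct arr)

-- ===== LEMMAS AND PROOFS =====

-- d.keys contains k exactly when the dict does
theorem pv_keys_contains (d : PySem.Dict Int Int) (k : Int) :
    PySem.Set.contains d.keys k = d.contains k := by
  apply Bool.eq_iff_iff.mpr
  simp only [PySem.Set.contains, PySem.Dict.keys, PySem.Dict.contains, List.contains_eq_mem,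
    decide_eq_true_eq, List.mem_map, List.any_eq_true, beq_iff_eq]

-- inserting a key acts on d.keys as Set.add
theorem pv_keys_insert (d : PySem.Dict Int Int) (k : Int) (v : Int) :
    (d.insert k v).keys = PySem.Set.add d.keys k := by
  unfold PySem.Dict.insert PySem.Set.add
  rw [pv_keys_contains]
  by_cases h : d.contains k = true
  · simp only [h, if_true, PySem.Dict.keys, List.map_map]
    refine List.map_congr_left (fun p _ => ?_)
    by_cases hpk : p.1 = k <;> simp [hpk]
  · simp [h, PySem.Dict.keys]

-- loop invariant for A's fold: running sum and distinct counter in terms of the key set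
theorem pv_loopA (arr : List Int) : ∀ (d : PySem.Dict Int Int) (s c : Int),
    (arr.foldl
      (fun (st : PySem.Dict Int Int × Int × Int) num =>
        let s := st.2.1 + num
        if st.1.contains num then
          (st.1.modify num 0 (· + 1), s, st.2.2)
        else
          (st.1.insert num 1, s, st.2.2 + 1))
      (d, s, c)).2
      = (s + arr.sum,
         c + (((PySem.Set.update d.keys arr).length : Int) - (d.keys.length : Int))) := by
  induction arr with
  | nil => intro d s c; simp [PySem.Set.update]
  | cons num rest ih =>
    intro d s c
    simp only [List.foldl_cons]
    cases h : d.contains num with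
    | true =>
      simp only [if_true]
      rw [ih]
      have hadd : PySem.Set.add d.keys num = d.keys := by
        rw [PySem.Set.add, pv_keys_contains, h]
        simp
      have hk : (d.modify num 0 (· + 1)).keys = d.keys := by
        rw [PySem.Dict.keys_modify, pv_keys_insert, hadd]
      have hupd : PySem.Set.update d.keys (num :: rest) = PySem.Set.update d.keys rest := by
        simp [PySem.Set.update, hadd]
      rw [hk, hupd, List.sum_cons, add_assoc]
    | false =>
      simp only [Bool.false_eq_true, if_false]
      rw [ih]
      have hk : (d.insert num 1).keys = d.keys ++ [num] := by
        rw [pv_keys_insert, PySem.Set.add, pv_keys_contains, h]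
        simp
      have hupd : PySem.Set.update d.keys (num :: rest)
          = PySem.Set.update (d.keys ++ [num]) rest := by
        simp only [PySem.Set.update, List.foldl_cons, PySem.Set.add, pv_keys_contains, h,
          Bool.false_eq_true, if_false]
      rw [hk, hupd, List.sum_cons]
      refine Prod.ext (by ring) ?_
      simp only [List.length_append, List.length_cons, List.length_nil]
      push_cast
      ring

-- the distinct-set size as a Finset cardinality
theorem pv_ofList_len (l : List Int) :
    ((PySem.Set.ofList l).length : Int) = (l.toFinset.card : Int) := by
  have hnd : (PySem.Set.ofList l).Nodup := PySem.Set.nodup_ofList l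
  have hmem : ∀ x, x ∈ PySem.Set.ofList l ↔ x ∈ l := fun x => PySem.Set.mem_ofList l x
  have : (PySem.Set.ofList l).toFinset = l.toFinset := by
    ext x; simp [hmem x]
  rw [← this, List.toFinset_card_of_nodup hnd]

-- B's adjacent-pair scan on a sorted list counts the distinct elements
theorem pv_zip_count (l : List Int) : ∀ (prev : Int) (acc : Int),
    (prev :: l).Pairwise (· ≤ ·) →
    ((prev :: l).zip l).foldl (fun acc p => if p.1 ≠ p.2 then acc + 1 else acc) acc
      = acc + (((prev :: l).toFinset.card : Int) - 1) := by
  induction l with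
  | nil => intro prev acc _; simp
  | cons b t ih =>
    intro prev acc hp
    have hpb : (b :: t).Pairwise (· ≤ ·) := hp.tail
    have hprev : ∀ x ∈ b :: t, prev ≤ x := fun x hx => (List.pairwise_cons.mp hp).1 x hx
    simp only [List.zip_cons_cons, List.foldl_cons]
    rw [ih b _ hpb]
    by_cases hne : prev = b
    · subst hne
      have : (prev :: prev :: t).toFinset = (prev :: t).toFinset := by
        simp [List.toFinset_cons]
      simp [this]
    · have hlt : prev < b := lt_of_le_of_ne (hprev b (by simp)) hne
      have hnotmem : prev ∉ (b :: t) := by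
        intro hmem
        rcases List.mem_cons.mp hmem with h | h
        · exact hne h
        · have hbx : b ≤ prev := (List.pairwise_cons.mp hpb).1 prev h
          omega
      have hcard : (prev :: b :: t).toFinset.card = (b :: t).toFinset.card + 1 := by
        simp only [List.toFinset_cons (a := prev)]
        rw [Finset.card_insert_of_notMem (by simpa using hnotmem)]
      have hcard1 : 1 ≤ (b :: t).toFinset.card := by
        refine Finset.card_pos.mpr ⟨b, by simp⟩
      simp only [hne, ne_eq, not_false_iff, if_true, hcard]
      push_cast
      ring

-- ===== VERDICT =====
theorem sum_and_count_distinct_spec : Claim_equal_sum_and_count_distinct := by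
  intro arr _
  unfold Spec_sum_and_count_distinct sum_and_count_distinct sum_and_count_distinct_alt
  have hA := pv_loopA arr PySem.Dict.empty 0 0
  have hAval : (arr.foldl
      (fun (st : PySem.Dict Int Int × Int × Int) num =>
        let s := st.2.1 + num
        if st.1.contains num then
          (st.1.modify num 0 (· + 1), s, st.2.2)
        else
          (st.1.insert num 1, s, st.2.2 + 1))
      (PySem.Dict.empty, 0, 0)).2
      = (arr.sum, ((PySem.Set.ofList arr).length : Int)) := by
    rw [hA]
    have hk0 : (PySem.Dict.empty : PySem.Dict Int Int).keys = ([] : List Int) := rfl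
    rw [hk0]
    have hup : PySem.Set.update ([] : PySem.Set Int) arr = PySem.Set.ofList arr := by
      simp [PySem.Set.ofList_eq_foldl, PySem.Set.update]
    rw [hup]
    simp
  have hperm : (PySem.List.sorted arr (fun x => x) false).Perm arr :=
    PySem.List.sorted_perm arr (fun x => x) false
  cases hnil : PySem.List.sorted arr (fun x => x) false with
  | nil =>
    have harr : arr = [] := by
      have := (PySem.List.sorted_eq_nil_iff (xs := arr) (key := fun x => x) (rev := false)).mp hnil
      exact this
    subst harr
    decide
  | cons m t =>
    rw [hnil] at hperm
    simp only [hnil, reduceCtorEq, if_false]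
    have hsorted : (m :: t).Pairwise (· ≤ ·) := by
      have := PySem.List.sorted_pairwise (xs := arr) (key := fun x => x)
      rw [hnil] at this
      simpa using this
    have hslice : PySem.List.slice (m :: t) (some 1) none = t := by
      rw [PySem.List.slice_from_one]; rfl
    rw [hslice]
    have hcount := pv_zip_count t m 0 hsorted
    rw [hAval]
    refine Prod.ext ?_ ?_
    · exact (hperm.sum_eq).symm
    · show ((PySem.Set.ofList arr).length : Int) = 1 + _
      rw [pv_ofList_len, hcount]
      have : arr.toFinset = (m :: t).toFinset := by
        ext x
        simp only [List.mem_toFinset, ← hperm.mem_iff, List.mem_cons]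
      rw [this]
      have hcard1 : 1 ≤ (m :: t).toFinset.card :=
        Finset.card_pos.mpr ⟨m, by simp⟩
      omega
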